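-- pv_equiv track=rewrite | github.com/TryoneBest/M-SDL_OpenSCENARIO | general_processing.py | cal_init
-- ===== SOURCE A (Python) =====
-- def cal_init(ego_speed, obj_speed_x, obj_x_range, obj_y_range):
--     left = 0
--     while left < len(obj_speed_x) and obj_speed_x[left] == 0:
--         left += 1
--     if left >= len(obj_speed_x):
--         return 1000, 1000, 1000
--     sum_val = 0
--     for j in range(left + 1):
--         sum_val += ego_speed[j]
--     return sum_val + obj_x_range[left], obj_y_range[left], obj_speed_x[left]
-- ===== SOURCE B (Python) =====
-- def cal_init(ego_speed, obj_speed_x, obj_x_range, obj_y_range):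
--     prefix = []
--     acc = 0
--     for e in ego_speed:
--         acc += e
--         prefix.append(acc)
--     for s, p, x, y in zip(obj_speed_x, prefix, obj_x_range, obj_y_range):
--         if s != 0:
--             return p + x, y, s
--     return 1000, 1000, 1000
-- ===== Notes on version B (the rewrite author's own statement) =====
-- stated objective: alternative
-- what changed: B replaces A's index-based while-scan plus second indexing loop by an index-free pipeline: it first materialises the running prefix sums of ego_speed, then walks a 4-way zip of speeds, prefix sums and ranges, returning at the first nonzero speed with no subscripting at all.
import Mathlib
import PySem

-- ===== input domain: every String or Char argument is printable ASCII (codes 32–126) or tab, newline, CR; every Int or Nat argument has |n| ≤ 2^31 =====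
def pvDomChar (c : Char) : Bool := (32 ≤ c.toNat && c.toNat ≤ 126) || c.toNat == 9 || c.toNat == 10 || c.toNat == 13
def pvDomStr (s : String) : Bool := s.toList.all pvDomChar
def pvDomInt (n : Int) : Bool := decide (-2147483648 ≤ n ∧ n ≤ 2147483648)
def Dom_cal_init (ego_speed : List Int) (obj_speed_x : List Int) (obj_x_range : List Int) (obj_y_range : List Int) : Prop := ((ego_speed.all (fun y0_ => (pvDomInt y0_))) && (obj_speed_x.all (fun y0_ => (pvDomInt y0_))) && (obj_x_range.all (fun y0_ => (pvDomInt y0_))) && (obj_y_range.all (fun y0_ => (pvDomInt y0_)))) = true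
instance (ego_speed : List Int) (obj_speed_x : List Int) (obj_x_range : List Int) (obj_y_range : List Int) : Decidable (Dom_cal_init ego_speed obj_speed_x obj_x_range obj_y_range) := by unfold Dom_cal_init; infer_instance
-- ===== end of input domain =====

-- B replaces A's index-based scan + second indexing loop by an index-free pipeline
-- (prefix-sum table, then a 4-way zip walk); objective: alternative decomposition.

-- ===== PORT A =====
-- while left < len(obj_speed_x) and obj_speed_x[left] == 0: left += 1
def pvWhileLeft (sx : List Int) (left : Nat) : Nat :=
  if _h : left < sx.length then
    if PySem.List.pyGetD sx (left : Int) 0 = 0 then pvWhileLeft sx (left + 1) else left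
  else left
termination_by sx.length - left

def cal_init (ego_speed : List Int) (obj_speed_x : List Int) (obj_x_range : List Int) (obj_y_range : List Int) : Int × Int × Int :=
  let left := pvWhileLeft obj_speed_x 0
  if obj_speed_x.length ≤ left then (1000, 1000, 1000)
  else
    -- for j in range(left + 1): sum_val += ego_speed[j]   (in range under Pre_)
    let sum_val := (PySem.List.pyRange 0 ((left : Int) + 1) 1).foldl (fun s j => s + PySem.List.pyGetD ego_speed j 0) 0
    (sum_val + PySem.List.pyGetD obj_x_range (left : Int) 0,
     PySem.List.pyGetD obj_y_range (left : Int) 0,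
     PySem.List.pyGetD obj_speed_x (left : Int) 0)

-- ===== PORT B =====
-- first loop: acc += e; prefix.append(acc)
def pvPrefix (acc : Int) : List Int → List Int
  | [] => []
  | e :: t => (acc + e) :: pvPrefix (acc + e) t

-- second loop: for s, p, x, y in zip(...): if s != 0: return p + x, y, s
def pvZipScan : List Int → List Int → List Int → List Int → Int × Int × Int
  | s :: st, p :: pt, x :: xt, y :: yt =>
    if s ≠ 0 then (p + x, y, s) else pvZipScan st pt xt yt
  | _, _, _, _ => (1000, 1000, 1000)

def cal_init_alt (ego_speed : List Int) (obj_speed_x : List Int) (obj_x_range : List Int) (obj_y_range : List Int) : Int × Int × Int :=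
  pvZipScan obj_speed_x (pvPrefix 0 ego_speed) obj_x_range obj_y_range

-- ===== PRECONDITION & SPEC =====
-- Pre_ excludes exactly the inputs where Python A raises IndexError: a first nonzero
-- speed index exists but ego_speed, obj_x_range or obj_y_range is too short to index there.
def Pre_cal_init (ego_speed : List Int) (obj_speed_x : List Int) (obj_x_range : List Int) (obj_y_range : List Int) : Prop :=
  let L := obj_speed_x.findIdx (fun v => v ≠ 0)
  L = obj_speed_x.length ∨ (L < ego_speed.length ∧ L < obj_x_range.length ∧ L < obj_y_range.length)
instance (ego_speed : List Int) (obj_speed_x : List Int) (obj_x_range : List Int) (obj_y_range : List Int) : Decidable (Pre_cal_init ego_speed obj_speed_x obj_x_range obj_y_range) := by unfold Pre_cal_init; infer_instance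

def pvWitness_cal_init : List Int × List Int × List Int × List Int := ([1, 2], [0, 3], [5, 6], [7, 8])

def Spec_cal_init (ego_speed : List Int) (obj_speed_x : List Int) (obj_x_range : List Int) (obj_y_range : List Int) (out : Int × Int × Int) : Prop := out = cal_init_alt ego_speed obj_speed_x obj_x_range obj_y_range
instance (ego_speed : List Int) (obj_speed_x : List Int) (obj_x_range : List Int) (obj_y_range : List Int) (out : Int × Int × Int) : Decidable (Spec_cal_init ego_speed obj_speed_x obj_x_range obj_y_range out) := by unfold Spec_cal_init; infer_instance

-- ===== CLAIM (what is proved, stated in full; the proofs are below) =====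
def Claim_equal_cal_init : Prop := ∀ (ego_speed : List Int) (obj_speed_x : List Int) (obj_x_range : List Int) (obj_y_range : List Int), Dom_cal_init ego_speed obj_speed_x obj_x_range obj_y_range → Pre_cal_init ego_speed obj_speed_x obj_x_range obj_y_range → Spec_cal_init ego_speed obj_speed_x obj_x_range obj_y_range (cal_init ego_speed obj_speed_x obj_x_range obj_y_range)

-- ===== LEMMAS AND PROOFS =====

-- A's prefix-sum loop equals the sum of the ego prefix (getD pads with 0 exactly where take truncates).
theorem pv_sum_getD_take (ego : List Int) (m : Nat) :
    (PySem.List.pyRange 0 ((m : Nat) : Int) 1).foldl (fun s j => s + PySem.List.pyGetD ego j 0) 0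
      = (ego.take m).sum := by
  induction m with
  | zero => simp [PySem.List.pyRange_zero]
  | succ m ih =>
    have hc : (((m + 1 : Nat)) : Int) = ((m : Nat) : Int) + 1 := by push_cast; ring
    rw [hc, PySem.List.pyRange_one_succ_right (by positivity), List.foldl_append, ih]
    simp only [List.foldl_cons, List.foldl_nil, PySem.List.pyGetD_natCast]
    by_cases h : m < ego.length
    · rw [List.getD_eq_getElem _ _ h, List.take_succ, List.sum_append]
      simp [List.getElem?_eq_getElem h]
    · push_neg at h
      rw [List.getD_eq_default _ _ h, List.take_of_length_le h, List.take_of_length_le (by omega)]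
      simp

-- A's while-loop computes the first-nonzero index, as a findIdx of the dropped suffix.
theorem pv_whileLeft_findIdx :
    ∀ (t sx : List Int) (k : Nat), sx.drop k = t →
    pvWhileLeft sx k = k + t.findIdx (fun v => v ≠ 0) := by
  intro t
  induction t with
  | nil =>
    intro sx k hdrop
    have hk : sx.length ≤ k := by
      by_contra h; push_neg at h
      have := List.drop_eq_nil_iff.mp hdrop
      omega
    rw [pvWhileLeft]
    simp [Nat.not_lt.mpr hk]
  | cons v rest ih =>
    intro sx k hdrop
    have hk : k < sx.length := by
      by_contra h; push_neg at h
      rw [List.drop_eq_nil_iff.mpr h] at hdrop; simp at hdrop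
    have h9 : sx[k]? = some v := by
      have := congrArg (fun l => l[0]?) hdrop
      simpa using this
    have hgetD : PySem.List.pyGetD sx ((k : Nat) : Int) 0 = v := by
      rw [PySem.List.pyGetD_natCast, List.getD_eq_getElem?_getD, h9]; rfl
    have hdrop' : sx.drop (k + 1) = rest := by
      have h10 : sx.drop (k + 1) = (sx.drop k).tail := by rw [← List.tail_drop]
      rw [h10, hdrop]; rfl
    rw [List.findIdx_cons]
    by_cases hv : v = 0
    · subst hv
      rw [pvWhileLeft, dif_pos hk, hgetD, if_pos rfl, ih sx (k + 1) hdrop']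
      simp only [show decide ((0 : Int) ≠ 0) = false from rfl, Bool.cond_false]
      omega
    · rw [pvWhileLeft, dif_pos hk, hgetD, if_neg hv]
      simp [hv]

-- pvPrefix has the same length as its input.
theorem pv_prefix_length (ego : List Int) : ∀ a : Int, (pvPrefix a ego).length = ego.length := by
  induction ego with
  | nil => intro a; rfl
  | cons e t ih => intro a; simp [pvPrefix, ih]

-- pvPrefix entries are the running sums.
theorem pv_prefix_getD (ego : List Int) :
    ∀ (a : Int) (L : Nat), L < ego.length →
    (pvPrefix a ego).getD L 0 = a + (ego.take (L + 1)).sum := by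
  induction ego with
  | nil => intro a L h; simp at h
  | cons e t ih =>
    intro a L h
    cases L with
    | zero => simp [pvPrefix]
    | succ L' =>
      simp only [pvPrefix, List.getD_cons_succ]
      rw [ih (a + e) L' (by simpa using h)]
      simp [List.take_succ_cons]
      ring

-- zip scan returns the sentinel when every speed is zero.
theorem pv_zipScan_allzero :
    ∀ (sx p x y : List Int), (∀ v ∈ sx, v = 0) →
    pvZipScan sx p x y = (1000, 1000, 1000) := by
  intro sx
  induction sx with
  | nil => intro p x y _; cases p <;> cases x <;> cases y <;> rfl
  | cons s st ih =>
    intro p x y hz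
    cases p with
    | nil => rfl
    | cons p0 pt =>
      cases x with
      | nil => rfl
      | cons x0 xt =>
        cases y with
        | nil => rfl
        | cons y0 yt =>
          have hs : s = 0 := hz s (List.mem_cons_self ..)
          simp only [pvZipScan, hs, ne_eq, not_true_eq_false, if_neg, ite_false,
            not_not, if_pos rfl]
          exact ih pt xt yt (fun v hv => hz v (List.mem_cons_of_mem _ hv))

-- zip scan returns the entries at the first nonzero index when all four lists reach it.
theorem pv_zipScan_found :
    ∀ (sx p x y : List Int) (L : Nat),
    sx.findIdx (fun v => v ≠ 0) = L → L < sx.length → L < p.length → L < x.length → L < y.length →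
    pvZipScan sx p x y = (p.getD L 0 + x.getD L 0, y.getD L 0, sx.getD L 0) := by
  intro sx
  induction sx with
  | nil => intro p x y L _ h; simp at h
  | cons s st ih =>
    intro p x y L hL hs hp hx hy
    cases p with
    | nil => simp at hp
    | cons p0 pt =>
      cases x with
      | nil => simp at hx
      | cons x0 xt =>
        cases y with
        | nil => simp at hy
        | cons y0 yt =>
          rw [List.findIdx_cons] at hL
          by_cases hv : s = 0
          · have hL2 : st.findIdx (fun v => v ≠ 0) + 1 = L := by rw [← hL]; simp [hv]
            cases L with
            | zero => omega
            | succ L' =>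
              have hL' : st.findIdx (fun v => v ≠ 0) = L' := by omega
              simp only [pvZipScan, hv, ne_eq, not_true_eq_false, ite_false, List.getD_cons_succ]
              exact ih pt xt yt L' hL' (by simpa using hs) (by simpa using hp)
                (by simpa using hx) (by simpa using hy)
          · have hL0 : L = 0 := by rw [← hL]; simp [hv]
            subst hL0
            simp [pvZipScan, hv]

-- ===== VERDICT (by name: the statement is the Claim_ definition above) =====
theorem cal_init_spec : Claim_equal_cal_init := by
  intro ego sx xr yr _hdom hpre
  unfold Spec_cal_init cal_init cal_init_alt
  have hwl : pvWhileLeft sx 0 = sx.findIdx (fun v => v ≠ 0) := by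
    simpa using pv_whileLeft_findIdx sx sx 0 (by simp)
  set L := sx.findIdx (fun v => v ≠ 0) with hLdef
  rcases Nat.lt_or_ge L sx.length with hsL | hsL
  · -- first nonzero at L; Pre_ gives all lists long enough
    have hpre' : L < ego.length ∧ L < xr.length ∧ L < yr.length := by
      unfold Pre_cal_init at hpre
      rcases hpre with h | h
      · omega
      · exact h
    obtain ⟨he, hx, hy⟩ := hpre'
    rw [hwl, if_neg (Nat.not_le.mpr hsL)]
    have hc : ((L : Nat) : Int) + 1 = (((L + 1 : Nat)) : Int) := by push_cast; ring
    rw [pv_zipScan_found sx (pvPrefix 0 ego) xr yr L rfl hsL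
      (by rw [pv_prefix_length]; exact he) hx hy]
    rw [pv_prefix_getD ego 0 L he]
    simp only [hc, pv_sum_getD_take, PySem.List.pyGetD_natCast, zero_add]
  · -- no nonzero speed: both return the sentinel
    have hz : ∀ v ∈ sx, v = 0 := by
      intro v hv
      by_contra hvne
      have : sx.findIdx (fun v => v ≠ 0) < sx.length :=
        List.findIdx_lt_length_of_exists ⟨v, hv, by simp [hvne]⟩
      omega
    have hLlen : L = sx.length := by
      have := List.findIdx_le_length (p := fun v => (v ≠ 0 : Bool)) (xs := sx)
      omega
    rw [hwl, hLlen, if_pos le_rfl]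
    exact (pv_zipScan_allzero sx (pvPrefix 0 ego) xr yr hz).symm
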